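-- pv_equiv track=rewrite | github.com/gfreundt/pythonCode | general/llaves/libro_crea.py | valida_llave_abre_cilindro
-- ===== SOURCE A (Python) =====
-- import itertools as it
--
-- def valida_llave_abre_cilindro(llaves, cilindro):
--
--     # crea lista de todas las llaves que pueden abrir ese cilindro
--     opciones = [
--         f"{pos[1]}{int(pos[1]) + int(pos[3])}" if ":" in pos else pos[1]
--         for pos in cilindro.split("]")[:-1]
--     ]
--     g = [i.replace("[", "").replace(":", "") for i in opciones]
--     cilindros = ["".join(i) for i in it.product(*g)]
--
--     # revisa llaves de lista y ver si abren cilindro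
--     for llave in llaves:
--         if llave not in cilindros:
--             return False
--     return True
-- ===== SOURCE B (Python) =====
-- def valida_llave_abre_cilindro(llaves, cilindro):
--     # per-position allowed-character sets; checks keys directly, no Cartesian product of keys
--     allowed = []
--     for pos in cilindro.split("]")[:-1]:
--         opt = f"{pos[1]}{int(pos[1]) + int(pos[3])}" if ":" in pos else pos[1]
--         allowed.append(set(opt.replace("[", "").replace(":", "")))
--     return all(
--         len(llave) == len(allowed)
--         and all(c in s for c, s in zip(llave, allowed))
--         for llave in llaves
--     )
-- ===== Notes on version B (the rewrite author's own statement) =====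
-- stated objective: alternative
-- what changed: B tests each key character-by-character against per-position allowed-character sets instead of materialising the Cartesian product of all openable keys and searching it (avoids the product blow-up when positions have many options, same measured cost on the generated inputs).
import Mathlib
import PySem

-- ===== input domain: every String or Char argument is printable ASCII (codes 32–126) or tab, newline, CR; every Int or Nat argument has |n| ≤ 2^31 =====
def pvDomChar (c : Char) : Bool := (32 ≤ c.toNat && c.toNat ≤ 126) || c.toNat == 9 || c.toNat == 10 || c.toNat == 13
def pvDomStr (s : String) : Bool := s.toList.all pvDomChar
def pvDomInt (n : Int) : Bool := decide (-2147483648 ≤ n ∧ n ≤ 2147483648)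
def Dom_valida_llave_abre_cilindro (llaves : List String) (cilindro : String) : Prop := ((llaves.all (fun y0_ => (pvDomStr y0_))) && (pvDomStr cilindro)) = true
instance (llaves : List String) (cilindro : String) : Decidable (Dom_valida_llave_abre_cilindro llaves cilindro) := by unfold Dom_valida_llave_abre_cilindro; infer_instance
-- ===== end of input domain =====

-- B replaces A's Cartesian product of all openable keys by a per-position allowed-character-set check of each key; return values proved equal on Pre_ (inputs where A raises no exception).


-- ===== PORT A =====
-- one list element of `opciones`: f"{pos[1]}{int(pos[1]) + int(pos[3])}" if ":" in pos else pos[1]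
-- (the .getD defaults are unreachable under Pre_, which says exactly where the Python raises)
def pvAOpt (pos : List Char) : List Char :=
  if PySem.Chars.isIn [':'] pos then
    let c1 : Char := (PySem.List.pyGet? pos 1).getD ' '
    let c3 : Char := (PySem.List.pyGet? pos 3).getD ' '
    [c1] ++ PySem.Int.toChars ((PySem.Int.ofChars? [c1]).getD 0 + (PySem.Int.ofChars? [c3]).getD 0)
  else [(PySem.List.pyGet? pos 1).getD ' ']

-- one list element of `g`: i.replace("[", "").replace(":", "")
def pvAG (pos : List Char) : List Char :=
  PySem.Chars.replace (PySem.Chars.replace (pvAOpt pos) ['['] []) [':'] []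

-- itertools.product(*g) with each tuple "".join-ed (tuples of 1-char strings joined = the char lists)
def pvAProd : List (List Char) → List (List Char)
  | [] => [[]]
  | g :: gs => g.flatMap (fun c => (pvAProd gs).map (c :: ·))

-- the final loop: for llave in llaves: if llave not in cilindros: return False / return True
def pvALoop : List String → List (List Char) → Bool
  | [], _ => true
  | llave :: rest, cilindros =>
      if cilindros.contains llave.toList then pvALoop rest cilindros else false

def valida_llave_abre_cilindro (llaves : List String) (cilindro : String) : Bool :=
  let parts := PySem.List.slice ((PySem.Chars.splitOn cilindro.toList [']'])) none (some (-1))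
  let cilindros := pvAProd (parts.map pvAG)
  pvALoop llaves cilindros

-- ===== PORT B =====
-- allowed.append(set(opt.replace("[", "").replace(":", "")))  where opt is as in Source B
def pvBAllowed (pos : List Char) : PySem.Set Char :=
  let opt : List Char :=
    if PySem.Chars.isIn [':'] pos then
      let c1 : Char := (PySem.List.pyGet? pos 1).getD ' '
      let c3 : Char := (PySem.List.pyGet? pos 3).getD ' '
      [c1] ++ PySem.Int.toChars ((PySem.Int.ofChars? [c1]).getD 0 + (PySem.Int.ofChars? [c3]).getD 0)
    else [(PySem.List.pyGet? pos 1).getD ' ']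
  PySem.Set.ofList (PySem.Chars.replace (PySem.Chars.replace opt ['['] []) [':'] [])

def valida_llave_abre_cilindro_alt (llaves : List String) (cilindro : String) : Bool :=
  let allowed := (PySem.List.slice ((PySem.Chars.splitOn cilindro.toList [']'])) none (some (-1))).map pvBAllowed
  llaves.all (fun llave =>
    llave.toList.length == allowed.length &&
      (llave.toList.zip allowed).all (fun p => PySem.Set.contains p.2 p.1))

-- ===== PRECONDITION & SPEC =====
-- Pre_ excludes exactly the inputs where the Python A raises: some piece of cilindro.split("]")[:-1]
-- is too short for the pos[1]/pos[3] indexing (IndexError) or pos[1]/pos[3] is not an int-parsable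
-- character when ":" is present (ValueError from int()).
def Pre_valida_llave_abre_cilindro (llaves : List String) (cilindro : String) : Prop :=
  ∀ pos ∈ PySem.List.slice ((PySem.Chars.splitOn cilindro.toList [']'])) none (some (-1)),
    (PySem.Chars.isIn [':'] pos = true →
      4 ≤ pos.length ∧ (PySem.Int.ofChars? ((pos.drop 1).take 1)).isSome
        ∧ (PySem.Int.ofChars? ((pos.drop 3).take 1)).isSome) ∧
    (PySem.Chars.isIn [':'] pos = false → 2 ≤ pos.length)
instance (llaves : List String) (cilindro : String) : Decidable (Pre_valida_llave_abre_cilindro llaves cilindro) := by unfold Pre_valida_llave_abre_cilindro; infer_instance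

def pvWitness_valida_llave_abre_cilindro : List String × String := (["25", "35"], "[2:3][5]")

def Spec_valida_llave_abre_cilindro (llaves : List String) (cilindro : String) (out : Bool) : Prop := out = valida_llave_abre_cilindro_alt llaves cilindro
instance (llaves : List String) (cilindro : String) (out : Bool) : Decidable (Spec_valida_llave_abre_cilindro llaves cilindro out) := by unfold Spec_valida_llave_abre_cilindro; infer_instance

-- ===== CLAIM (what is proved, stated in full; the proofs are below) =====
def Claim_equal_valida_llave_abre_cilindro : Prop := ∀ (llaves : List String) (cilindro : String), Dom_valida_llave_abre_cilindro llaves cilindro → Pre_valida_llave_abre_cilindro llaves cilindro → Spec_valida_llave_abre_cilindro llaves cilindro (valida_llave_abre_cilindro llaves cilindro)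

-- ===== LEMMAS AND PROOFS =====

-- membership in the Cartesian product = pointwise membership
theorem pv_mem_prodA (gs : List (List Char)) (l : List Char) :
    l ∈ pvAProd gs ↔ List.Forall₂ (fun c g => c ∈ g) l gs := by
  induction gs generalizing l with
  | nil =>
    simp [pvAProd, List.forall₂_iff_zip]
  | cons g gs ih =>
    simp only [pvAProd, List.mem_flatMap, List.mem_map]
    constructor
    · rintro ⟨c, hc, t, ht, rfl⟩
      exact List.Forall₂.cons hc ((ih t).mp ht)
    · intro h
      cases h with
      | cons hc ht => exact ⟨_, hc, _, (ih _).mpr ht, rfl⟩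

-- A's loop is an `all` over llaves
theorem pv_loop_eq_all (llaves : List String) (cs : List (List Char)) :
    pvALoop llaves cs = llaves.all (fun l => cs.contains l.toList) := by
  induction llaves with
  | nil => rfl
  | cons l rest ih =>
    cases h : cs.contains l.toList <;>
      simp [pvALoop, List.all_cons, ih]

-- B's per-key test equals membership in A's product
theorem pv_key_test (gs : List (List Char)) (l : List Char) :
    (pvAProd gs).contains l
      = (l.length == (gs.map (fun g => PySem.Set.ofList g)).length &&
          (l.zip (gs.map (fun g => PySem.Set.ofList g))).all (fun p => PySem.Set.contains p.2 p.1)) := by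
  rw [Bool.eq_iff_iff, List.contains_iff_mem, pv_mem_prodA, List.forall₂_iff_zip]
  simp only [Bool.and_eq_true, List.all_eq_true, List.length_map, beq_iff_eq,
    List.zip_map_right, List.mem_map]
  constructor
  · rintro ⟨hlen, h⟩
    refine ⟨hlen, ?_⟩
    rintro p ⟨⟨a, b⟩, hab, rfl⟩
    simpa [PySem.Set.contains, PySem.Set.mem_ofList] using h hab
  · rintro ⟨hlen, h⟩
    refine ⟨hlen, ?_⟩
    intro a b hab
    have := h (Prod.map id (fun g => PySem.Set.ofList g) (a, b)) ⟨(a, b), hab, rfl⟩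
    simpa [PySem.Set.contains, PySem.Set.mem_ofList] using this

-- B's allowed set for a position is the set of A's option characters
theorem pv_allowed_eq (pos : List Char) : pvBAllowed pos = PySem.Set.ofList (pvAG pos) := rfl

-- ===== VERDICT (by name: the statement is the Claim_ definition above) =====
theorem valida_llave_abre_cilindro_spec : Claim_equal_valida_llave_abre_cilindro := by
  intro llaves cilindro _ _
  unfold Spec_valida_llave_abre_cilindro valida_llave_abre_cilindro valida_llave_abre_cilindro_alt
  rw [pv_loop_eq_all]
  refine List.all_congr rfl (fun l => ?_)
  rw [pv_key_test]
  have hmap : ((fun g => PySem.Set.ofList g) ∘ pvAG) = pvBAllowed :=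
    funext fun pos => (pv_allowed_eq pos).symm
  rw [List.map_map, hmap]
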